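-- pv_equiv track=rewrite | github.com/GouthaM-Krish-nA/Beginner-Quest | pythonacads/q12.py | k_frequencies
-- ===== SOURCE A (Python) =====
-- def k_frequencies(s):
--     d={}
--     p=[]
--     for i in s:
--         if i in d:
--             d[i]+=1
--         else:
--             d[i]=1
--     while d:
--         m=max(d.values())
--         k=[x for x,y in d.items() if y==m]
--         d={f:v for f, v in d.items() if v!=m}
--         p.append(k)
--
--     return p
-- ===== SOURCE B (Python) =====
-- def k_frequencies(s):
--     counts = {}
--     for ch in s:
--         counts[ch] = counts.get(ch, 0) + 1
--     result = []
--     for m in range(len(s), 0, -1):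
--         group = [c for c, n in counts.items() if n == m]
--         if group:
--             result.append(group)
--     return result
-- ===== Notes on version B (the rewrite author's own statement) =====
-- stated objective: simpler
-- what changed: A repeatedly scans the dict for the maximum count and rebuilds the dict without it; B counts once and makes a single downward pass over the possible frequencies len(s)..1, emitting each nonempty group, with no max-scans and no dict rebuilding.
import Mathlib
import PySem

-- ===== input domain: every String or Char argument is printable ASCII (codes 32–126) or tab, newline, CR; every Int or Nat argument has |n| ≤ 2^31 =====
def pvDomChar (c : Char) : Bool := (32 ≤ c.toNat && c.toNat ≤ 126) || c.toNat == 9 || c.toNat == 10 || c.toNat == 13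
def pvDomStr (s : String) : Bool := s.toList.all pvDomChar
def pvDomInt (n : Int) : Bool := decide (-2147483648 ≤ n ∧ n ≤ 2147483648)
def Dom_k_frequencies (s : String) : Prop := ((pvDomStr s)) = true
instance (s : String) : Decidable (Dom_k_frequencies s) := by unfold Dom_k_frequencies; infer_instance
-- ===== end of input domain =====

-- B replaces A's repeated max-scan-and-rebuild-dict loop by one downward scan over the
-- possible frequencies (len(s)..1), emitting each nonempty group; objective: simpler.

-- ===== PORT A =====
-- the while loop: `while d:` + `m=max(d.values())` (max? = none exactly when the dict is empty);
-- the dict comprehension `{f:v for f,v in d.items() if v!=m}` over the (distinct-keyed) items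
-- is ported as the filtered items list, which is exact since keys stay distinct.
def kfreqLoop (items : List (String × Int)) (p : List (List String)) : List (List String) :=
  if _h : items = [] then p
  else
    -- max(d.values()) on the nonempty dict; getD 0 is never taken (max? is some on a nonempty list)
    let m := (PySem.List.max? (items.map (·.2)) (fun y => y)).getD 0
    kfreqLoop (items.filter (fun fv => fv.2 ≠ m))
      (p ++ [(items.filter (fun xy => xy.2 = m)).map (·.1)])
termination_by items.length
decreasing_by
  simp only [List.map_subtype, List.unattach_attach]
  rw [List.unattach_filter
        (g := fun fv => decide (fv.2 ≠ (PySem.List.max? (items.map (·.2)) (fun y => y)).getD 0))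
        (hf := fun x h => rfl), List.unattach_attach]
  cases hx : PySem.List.max? (items.map (·.2)) (fun y => y) with
  | none => exact absurd (by simpa using (PySem.List.max?_eq_none_iff (items.map (·.2)) (fun y => y)).mp hx) _h
  | some m' =>
      rcases List.mem_map.mp (PySem.List.max?_mem hx) with ⟨x, hxl, hv⟩
      refine List.length_filter_lt_length_iff_exists.mpr ⟨x, hxl, ?_⟩
      simp [hv]

def k_frequencies (s : String) : List (List String) :=
  let d := s.toList.foldl (fun d i =>
      if d.contains (String.singleton i) then d.modify (String.singleton i) 0 (· + 1)
      else d.insert (String.singleton i) 1) PySem.Dict.empty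
  kfreqLoop d.items []

-- ===== PORT B =====
def k_frequencies_alt (s : String) : List (List String) :=
  let counts := s.toList.foldl (fun d ch =>
      d.insert (String.singleton ch) (d.getD (String.singleton ch) 0 + 1)) PySem.Dict.empty
  (PySem.List.pyRange (PySem.Str.len s) 0 (-1)).foldl (fun res m =>
      let group := (counts.items.filter (fun cn => cn.2 = m)).map (·.1)
      if group ≠ [] then res ++ [group] else res) []

-- ===== PRECONDITION & SPEC =====
def Spec_k_frequencies (s : String) (out : List (List String)) : Prop := out = k_frequencies_alt s
instance (s : String) (out : List (List String)) : Decidable (Spec_k_frequencies s out) := by unfold Spec_k_frequencies; infer_instance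

-- ===== CLAIM (what is proved, stated in full; the proofs are below) =====
def Claim_equal_k_frequencies : Prop := ∀ (s : String), Dom_k_frequencies s → Spec_k_frequencies s (k_frequencies s)

-- ===== LEMMAS AND PROOFS =====

-- A's counting step equals B's counting step
theorem kfreq_count_step (d : PySem.Dict String Int) (k : String) :
    (if d.contains k then d.modify k 0 (· + 1) else d.insert k 1)
      = d.insert k (d.getD k 0 + 1) := by
  by_cases h : d.contains k
  · simp [h, PySem.Dict.modify]
  · have h' : d.contains k = false := by simpa using h
    simp [h', PySem.Dict.getD_of_not_contains d 0 h']

-- both counting folds produce Counter(map singleton chars)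
theorem kfreq_count_eq (cs : List Char) :
    cs.foldl (fun d ch => d.insert (String.singleton ch) (d.getD (String.singleton ch) 0 + 1))
      PySem.Dict.empty
      = PySem.Dict.counter (cs.map String.singleton) := by
  rw [← PySem.Dict.foldl_insert_getD_add_one_eq_counter, List.foldl_map]

-- first-maximum of a list with an attained upper bound
theorem kfreq_max_eq (xs : List Int) (M : Int) (hmem : M ∈ xs) (hub : ∀ x ∈ xs, x ≤ M) :
    PySem.List.max? xs (fun y => y) = some M := by
  cases hx : PySem.List.max? xs (fun y => y) with
  | none =>
      exact absurd ((PySem.List.max?_eq_none_iff xs _).mp hx ▸ hmem) (by simp)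
  | some m =>
      have h1 : m ∈ xs := PySem.List.max?_mem hx
      have h2 : M ≤ m := PySem.List.max?_isMax hx M hmem
      have h3 : m ≤ M := hub m h1
      exact congrArg some (le_antisymm h3 h2)

-- B's scan, as a named recursion-friendly form
def bscan (l : List (String × Int)) (N : Int) (acc : List (List String)) : List (List String) :=
  (PySem.List.pyRange N 0 (-1)).foldl (fun res m =>
      let group := (l.filter (fun cn => cn.2 = m)).map (·.1)
      if group ≠ [] then res ++ [group] else res) acc

theorem bscan_zero (l : List (String × Int)) (acc : List (List String)) : bscan l 0 acc = acc := by
  simp [bscan, PySem.List.pyRange_neg_one_eq_nil (by omega : (0:Int) ≤ 0)]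

theorem bscan_succ (l : List (String × Int)) (n : Nat) (acc : List (List String)) :
    bscan l ((n : Int) + 1) acc
      = bscan l (n : Int)
          (let group := (l.filter (fun cn => cn.2 = (n : Int) + 1)).map (·.1);
           if group ≠ [] then acc ++ [group] else acc) := by
  unfold bscan
  rw [PySem.List.pyRange_neg_one_cons (by omega : (0:Int) < (n : Int) + 1)]
  simp

-- bscan only looks at values in 1..N
theorem bscan_congr (n : Nat) (l l' : List (String × Int)) (acc : List (List String))
    (h : ∀ m : Int, 0 < m → m ≤ (n : Int) →
        l'.filter (fun cn => cn.2 = m) = l.filter (fun cn => cn.2 = m)) :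
    bscan l' (n : Int) acc = bscan l (n : Int) acc := by
  induction n generalizing acc with
  | zero => simp [bscan_zero]
  | succ k ih =>
      have hk : ((k : Int) + 1) = (((k + 1 : Nat)) : Int) := by push_cast; ring
      rw [← hk, bscan_succ, bscan_succ]
      rw [h ((k : Int) + 1) (by omega) (by omega)]
      exact ih _ (fun m h1 h2 => h m h1 (by omega))

-- the core equivalence: A's extraction loop = B's downward scan
theorem kfreq_loop_eq_bscan (n : Nat) (l : List (String × Int)) (p : List (List String))
    (hv : ∀ q ∈ l, 1 ≤ q.2 ∧ q.2 ≤ (n : Int)) :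
    kfreqLoop l p = bscan l (n : Int) p := by
  induction n generalizing l p with
  | zero =>
      have hl : l = [] := by
        cases l with
        | nil => rfl
        | cons a t => exact absurd (hv a (by simp)) (by omega)
      subst hl
      rw [Nat.cast_zero, bscan_zero]
      unfold kfreqLoop
      simp
  | succ k ih =>
      have hk : (((k + 1 : Nat)) : Int) = (k : Int) + 1 := by push_cast; ring
      rw [hk]
      by_cases hex : ∃ q ∈ l, q.2 = (k : Int) + 1
      · -- the maximum value (k+1) is attained
        rcases hex with ⟨q, hq, hqv⟩
        have hmax : PySem.List.max? (l.map (·.2)) (fun y => y) = some ((k : Int) + 1) := by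
          apply kfreq_max_eq
          · exact List.mem_map.mpr ⟨q, hq, hqv⟩
          · intro x hx
            rcases List.mem_map.mp hx with ⟨r, hr, hrv⟩
            have := (hv r hr).2
            omega
        have hlne : l ≠ [] := by rintro rfl; simp at hq
        rw [kfreqLoop, hmax, dif_neg hlne]
        simp only [Option.getD_some]
        have hgne : (l.filter (fun xy => xy.2 = (k : Int) + 1)).map (·.1) ≠ [] := by
          intro hcon
          have : q ∈ l.filter (fun xy => xy.2 = (k : Int) + 1) := by
            simp [List.mem_filter, hq, hqv]
          simp [List.map_eq_nil_iff.mp hcon] at this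
        rw [bscan_succ]
        simp only [hgne, if_pos, ne_eq, not_false_eq_true]
        have hsub : ∀ r ∈ l.filter (fun fv => fv.2 ≠ (k : Int) + 1), 1 ≤ r.2 ∧ r.2 ≤ (k : Int) := by
          intro r hr
          rcases List.mem_filter.mp hr with ⟨hrl, hrne⟩
          have h1 := hv r hrl
          have h2 : r.2 ≠ (k : Int) + 1 := by simpa using hrne
          omega
        rw [ih _ _ (by simpa using hsub)]
        apply bscan_congr
        intro m hm1 hm2
        rw [List.filter_filter]
        apply List.filter_congr
        intro x _
        by_cases hxm : x.2 = m
        · simp [hxm]; omega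
        · simp [hxm]
      · -- value k+1 absent: A's loop state unchanged, B skips an empty group
        have hfe : l.filter (fun cn => cn.2 = (k : Int) + 1) = [] := by
          apply List.filter_eq_nil_iff.mpr
          intro a ha
          simp only [decide_eq_true_eq]
          exact fun hc => hex ⟨a, ha, hc⟩
        rw [bscan_succ]
        simp only [hfe, List.map_nil, ne_eq, not_true_eq_false, if_false]
        exact ih l p (fun q hq => ⟨(hv q hq).1, by
          have h1 := (hv q hq).2
          have h2 : q.2 ≠ (k : Int) + 1 := fun hc => hex ⟨q, hq, hc⟩
          omega⟩)

-- values of Counter(ys) lie in 1..|ys|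
theorem kfreq_counter_values (ys : List String) (q : String × Int)
    (hq : q ∈ (PySem.Dict.counter ys).items) : 1 ≤ q.2 ∧ q.2 ≤ (ys.length : Int) := by
  rw [PySem.Dict.items_counter] at hq
  rcases List.mem_map.mp hq with ⟨c, hc, hcq⟩
  have hmem : c ∈ ys := (PySem.Set.mem_ofList ys c).mp hc
  have h1 : 1 ≤ ys.count c := List.one_le_count_iff.mpr hmem
  have h2 : ys.count c ≤ ys.length := List.count_le_length
  constructor <;> · rw [← hcq]; simp; omega

-- ===== VERDICT (by name: the statement is the Claim_ definition above) =====
theorem k_frequencies_spec : Claim_equal_k_frequencies := by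
  intro s _
  show k_frequencies s = k_frequencies_alt s
  unfold k_frequencies k_frequencies_alt
  simp only
  have hstep : (fun (d : PySem.Dict String Int) (i : Char) =>
      if d.contains (String.singleton i) then d.modify (String.singleton i) 0 (· + 1)
      else d.insert (String.singleton i) 1)
      = (fun d i => d.insert (String.singleton i) (d.getD (String.singleton i) 0 + 1)) := by
    funext d i
    exact kfreq_count_step d (String.singleton i)
  rw [hstep, kfreq_count_eq]
  have hlen : PySem.Str.len s = ((s.toList.length : Nat) : Int) := rfl
  rw [hlen]
  have := kfreq_loop_eq_bscan s.toList.length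
      (PySem.Dict.counter (s.toList.map String.singleton)).items []
      (fun q hq => by
        have h := kfreq_counter_values (s.toList.map String.singleton) q hq
        simpa using h)
  rw [this]
  rfl
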